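-- pv_equiv track=rewrite | github.com/monuszko/alien-survey-technology | render.py | as_tokens
-- ===== SOURCE A (Python) =====
-- def as_tokens(points):
--     tokens = []
--     points = int(points)
--     while points:
--         for token in (10, 5, 1):
--             if token <= points:
--                 tokens.append(token)
--                 points -= token
--                 break
--     return tokens
-- ===== SOURCE B (Python) =====
-- def as_tokens(points):
--     p = int(points)
--     tens, rem = divmod(p, 10)
--     fives, ones = divmod(rem, 5)
--     return [10] * tens + [5] * fives + [1] * ones
-- ===== Notes on version B (the rewrite author's own statement) =====
-- stated objective: simpler
-- what changed: Replaces the greedy per-token subtraction loop with closed-form divmod arithmetic that computes each token count directly and builds the list with replication.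
import Mathlib
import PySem

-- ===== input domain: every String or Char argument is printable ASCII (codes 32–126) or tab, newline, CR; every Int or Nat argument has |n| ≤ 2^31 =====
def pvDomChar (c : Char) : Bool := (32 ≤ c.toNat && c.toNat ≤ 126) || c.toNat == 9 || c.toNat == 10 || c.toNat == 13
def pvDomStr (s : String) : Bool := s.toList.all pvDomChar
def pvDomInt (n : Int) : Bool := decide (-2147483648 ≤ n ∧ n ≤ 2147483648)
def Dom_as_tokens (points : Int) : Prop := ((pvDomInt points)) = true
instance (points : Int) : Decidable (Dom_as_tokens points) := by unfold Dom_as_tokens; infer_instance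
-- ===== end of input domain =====

-- B replaces A's greedy one-token-per-iteration subtraction loop with closed-form divmod
-- arithmetic (objective: simpler); equivalence is claimed on 0 ≤ points, where A terminates.

-- ===== PORT A =====
-- the while loop: each iteration appends the first token in (10,5,1) that is ≤ points and
-- subtracts it; when points is negative Python never breaks out (it diverges there, which is
-- outside Pre_), the Lean recursion just stops in that unreachable branch.
def asTokensLoop (points : Int) (tokens : List Int) : List Int :=
  if points ≠ 0 then
    if 10 ≤ points then asTokensLoop (points - 10) (tokens ++ [10])
    else if 5 ≤ points then asTokensLoop (points - 5) (tokens ++ [5])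
    else if 1 ≤ points then asTokensLoop (points - 1) (tokens ++ [1])
    else tokens   -- Python diverges here (points < 0); excluded by Pre_as_tokens
  else tokens
termination_by points.toNat
decreasing_by all_goals omega

def as_tokens (points : Int) : List Int := asTokensLoop points []

-- ===== PORT B =====
def as_tokens_alt (points : Int) : List Int :=
  let tens := PySem.Int.floordiv points 10
  let rem := PySem.Int.mod points 10
  let fives := PySem.Int.floordiv rem 5
  let ones := PySem.Int.mod rem 5
  List.replicate tens.toNat 10 ++ List.replicate fives.toNat 5 ++ List.replicate ones.toNat 1

-- ===== PRECONDITION & SPEC =====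
-- Pre_ excludes negative points, on which Python A loops forever (no token ≤ points ever fires).
def Pre_as_tokens (points : Int) : Prop := 0 ≤ points
instance (points : Int) : Decidable (Pre_as_tokens points) := by unfold Pre_as_tokens; infer_instance
def pvWitness_as_tokens : Int := (27)

def Spec_as_tokens (points : Int) (out : List Int) : Prop := out = as_tokens_alt points
instance (points : Int) (out : List Int) : Decidable (Spec_as_tokens points out) := by unfold Spec_as_tokens; infer_instance

-- ===== CLAIM (what is proved, stated in full; the proofs are below) =====
def Claim_equal_as_tokens : Prop := ∀ (points : Int), Dom_as_tokens points → Pre_as_tokens points → Spec_as_tokens points (as_tokens points)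

-- ===== LEMMAS AND PROOFS =====

theorem alt_ediv (points : Int) (_h : 0 ≤ points) :
    as_tokens_alt points =
      List.replicate (points / 10).toNat 10 ++ List.replicate (points % 10 / 5).toNat 5 ++
        List.replicate (points % 10 % 5).toNat 1 := by
  unfold as_tokens_alt
  simp only [PySem.Int.floordiv_eq_ediv_of_pos (by norm_num : (0:Int) < 10),
    PySem.Int.mod_eq_emod_of_pos (by norm_num : (0:Int) < 10),
    PySem.Int.floordiv_eq_ediv_of_pos (by norm_num : (0:Int) < 5),
    PySem.Int.mod_eq_emod_of_pos (by norm_num : (0:Int) < 5)]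

theorem alt_sub10 (p : Int) (h : 10 ≤ p) : as_tokens_alt p = 10 :: as_tokens_alt (p - 10) := by
  rw [alt_ediv p (by omega), alt_ediv (p - 10) (by omega)]
  have h1 : (p / 10).toNat = (((p - 10) / 10).toNat) + 1 := by omega
  have h2 : p % 10 = (p - 10) % 10 := by omega
  rw [h1, h2, List.replicate_succ]
  simp

theorem alt_sub5 (p : Int) (h5 : 5 ≤ p) (h10 : p < 10) :
    as_tokens_alt p = 5 :: as_tokens_alt (p - 5) := by
  rw [alt_ediv p (by omega), alt_ediv (p - 5) (by omega)]
  have e1 : p % 10 = p := by omega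
  have e2 : (p - 5) % 10 = p - 5 := by omega
  have h1 : (p / 10).toNat = 0 := by omega
  have h2 : ((p - 5) / 10).toNat = 0 := by omega
  have h3 : (p / 5).toNat = ((p - 5) / 5).toNat + 1 := by omega
  have h4 : p % 5 = (p - 5) % 5 := by omega
  rw [e1, e2, h1, h2, h3, h4, List.replicate_succ]
  simp

theorem alt_sub1 (p : Int) (h1 : 1 ≤ p) (h5 : p < 5) :
    as_tokens_alt p = 1 :: as_tokens_alt (p - 1) := by
  rw [alt_ediv p (by omega), alt_ediv (p - 1) (by omega)]
  have e1 : p % 10 = p := by omega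
  have e2 : (p - 1) % 10 = p - 1 := by omega
  have a1 : (p / 10).toNat = 0 := by omega
  have a2 : ((p - 1) / 10).toNat = 0 := by omega
  have b1 : (p / 5).toNat = 0 := by omega
  have b2 : ((p - 1) / 5).toNat = 0 := by omega
  have c1 : (p % 5).toNat = ((p - 1) % 5).toNat + 1 := by omega
  rw [e1, e2, a1, a2, b1, b2, c1, List.replicate_succ]
  simp

theorem alt_zero : as_tokens_alt 0 = [] := by decide

theorem loop_eq : ∀ (n : Nat) (p : Int), 0 ≤ p → p.toNat = n →
    ∀ tokens, asTokensLoop p tokens = tokens ++ as_tokens_alt p := by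
  intro n
  induction n using Nat.strong_induction_on with
  | _ n ih =>
    intro p hp hn tokens
    rw [asTokensLoop]
    split_ifs with h0 h10 h5 h1
    · rw [ih (p - 10).toNat (by omega) (p - 10) (by omega) rfl, alt_sub10 p h10]; simp
    · rw [ih (p - 5).toNat (by omega) (p - 5) (by omega) rfl, alt_sub5 p h5 (by omega)]; simp
    · rw [ih (p - 1).toNat (by omega) (p - 1) (by omega) rfl, alt_sub1 p h1 (by omega)]; simp
    · omega
    · have : p = 0 := by omega
      subst this; rw [alt_zero]; simp

-- ===== VERDICT (by name: the statement is the Claim_ definition above) =====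
theorem as_tokens_spec : Claim_equal_as_tokens := by
  intro points _ hpre
  unfold Spec_as_tokens as_tokens
  exact loop_eq points.toNat points hpre rfl []
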